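-- pv_equiv track=rewrite | github.com/NamiSwwaan/dialogue-generator- | text_generator.py | create_trigrams
-- ===== SOURCE A (Python) =====
-- import string
--
-- def clean(word):
--     checkers = ['\n']
--     return ''.join([char for char in word if char not in string.punctuation and char not in checkers])
--
-- def create_trigrams(data):
--     trigrams = []
--     for line in data:
--         words = [clean(word.lower()) for word in line.split(" ")]
--         trigram = []
--         for word in words:
--             if word:
--                 if len(trigram) < 3:
--                     trigram.append(word)
--                 else:
--                     trigram.pop(0)
--                     trigram.append(word)
--                 if len(trigram) == 3:
--                     trigrams.append(trigram.copy())
--     return trigrams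
-- ===== SOURCE B (Python) =====
-- import string
--
-- def clean(word):
--     checkers = ['\n']
--     return ''.join([char for char in word if char not in string.punctuation and char not in checkers])
--
-- def create_trigrams(data):
--     trigrams = []
--     for line in data:
--         words = [w for w in (clean(word.lower()) for word in line.split(" ")) if w]
--         for triple in zip(words, words[1:], words[2:]):
--             trigrams.append(list(triple))
--     return trigrams
-- ===== Notes on version B (the rewrite author's own statement) =====
-- stated objective: idiomatic
-- what changed: B first collects the cleaned non-empty words of each line, then forms trigrams by zipping the word list with its two shifts, replacing A's incremental append/pop-front sliding-window state machine.
import Mathlib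
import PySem

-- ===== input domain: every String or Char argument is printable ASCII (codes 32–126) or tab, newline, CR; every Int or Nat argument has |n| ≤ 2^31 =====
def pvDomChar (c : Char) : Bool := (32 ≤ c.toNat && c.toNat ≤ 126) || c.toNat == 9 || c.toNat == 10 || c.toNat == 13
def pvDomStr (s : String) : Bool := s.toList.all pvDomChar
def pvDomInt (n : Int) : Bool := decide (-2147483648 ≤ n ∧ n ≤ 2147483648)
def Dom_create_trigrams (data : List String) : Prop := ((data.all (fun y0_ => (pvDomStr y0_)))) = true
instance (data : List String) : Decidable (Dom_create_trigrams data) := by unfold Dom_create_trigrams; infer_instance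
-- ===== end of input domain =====

-- B first collects the cleaned non-empty words of each line, then zips the word list with its
-- two shifts to form the trigrams, instead of A's append/pop-front sliding-window state machine.

-- shared helper: Python's clean(word) — drop punctuation and '\n' (exact on the ASCII domain)
def pvPunct : List Char := "!\"#$%&'()*+,-./:;<=>?@[\\]^_`{|}~".toList

def pvClean (word : List Char) : String :=
  String.ofList (word.filter (fun c => decide (c ∉ pvPunct) && decide (c ∉ ['\n'])))

-- ===== PORT A =====
-- one step of A's inner loop: state = (trigrams so far, current window)
def pvStepA (st : List (List String) × List String) (word : String) :
    List (List String) × List String :=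
  if word ≠ "" then
    let tri := if st.2.length < 3 then st.2 ++ [word] else st.2.tail ++ [word]
    if tri.length = 3 then (st.1 ++ [tri], tri) else (st.1, tri)
  else st

def create_trigrams (data : List String) : List (List String) :=
  data.foldl (fun trigrams line =>
    let words := (PySem.Chars.splitOn line.toList " ".toList).map
        (fun w => pvClean (PySem.Chars.lower w))
    (words.foldl pvStepA (trigrams, [])).1) []

-- ===== PORT B =====
-- zip(words, words[1:], words[2:]) with each triple listed
def pvWin3 (ws : List String) : List (List String) :=
  (ws.zip ((ws.drop 1).zip (ws.drop 2))).map (fun p => [p.1, p.2.1, p.2.2])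

def create_trigrams_alt (data : List String) : List (List String) :=
  data.foldl (fun trigrams line =>
    let words := ((PySem.Chars.splitOn line.toList " ".toList).map
        (fun w => pvClean (PySem.Chars.lower w))).filter (fun w => w ≠ "")
    trigrams ++ pvWin3 words) []

-- ===== PRECONDITION & SPEC =====
def Spec_create_trigrams (data : List String) (out : List (List String)) : Prop := out = create_trigrams_alt data
instance (data : List String) (out : List (List String)) : Decidable (Spec_create_trigrams data out) := by unfold Spec_create_trigrams; infer_instance

-- ===== CLAIM (what is proved, stated in full; the proofs are below) =====
def Claim_equal_create_trigrams : Prop := ∀ (data : List String), Dom_create_trigrams data → Spec_create_trigrams data (create_trigrams data)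

-- ===== LEMMAS AND PROOFS =====

-- empty words are skipped by pvStepA, so the loop runs on the filtered list
theorem pvStepA_skip (ws : List String) (st : List (List String) × List String) :
    ws.foldl pvStepA st = (ws.filter (fun w => w ≠ "")).foldl pvStepA st := by
  induction ws generalizing st with
  | nil => rfl
  | cons w ws ih =>
      by_cases hw : w = ""
      · subst hw
        simpa [pvStepA] using ih st
      · simp [hw, ih]

theorem pvWin3_cons (a b c : String) (r : List String) :
    pvWin3 (a :: b :: c :: r) = [a, b, c] :: pvWin3 (b :: c :: r) := by
  simp [pvWin3]

-- steady state: once the window is full, each word emits one trigram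
theorem pvStepA_steady (fs : List String) (hfs : ∀ w ∈ fs, w ≠ "")
    (tris : List (List String)) (a b c : String) :
    (fs.foldl pvStepA (tris, [a, b, c])).1 = tris ++ pvWin3 (b :: c :: fs) := by
  induction fs generalizing tris a b c with
  | nil => simp [pvWin3]
  | cons w fs ih =>
      have hw : w ≠ "" := hfs w (by simp)
      have hfs' : ∀ x ∈ fs, x ≠ "" := fun x hx => hfs x (by simp [hx])
      rw [List.foldl_cons]
      have hstep : pvStepA (tris, [a, b, c]) w = (tris ++ [[b, c, w]], [b, c, w]) := by
        simp [pvStepA, hw]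
      rw [hstep, ih hfs', pvWin3_cons]
      simp

-- startup: from the empty window the loop yields exactly the trigram windows
theorem pvStepA_run (fs : List String) (hfs : ∀ w ∈ fs, w ≠ "")
    (tris : List (List String)) :
    (fs.foldl pvStepA (tris, [])).1 = tris ++ pvWin3 fs := by
  match fs with
  | [] => simp [pvWin3]
  | [x] =>
      have hx : x ≠ "" := hfs x (by simp)
      simp [pvStepA, hx, pvWin3]
  | [x, y] =>
      have hx : x ≠ "" := hfs x (by simp)
      have hy : y ≠ "" := hfs y (by simp)
      simp [pvStepA, hx, hy, pvWin3]
  | x :: y :: z :: r =>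
      have hx : x ≠ "" := hfs x (by simp)
      have hy : y ≠ "" := hfs y (by simp)
      have hz : z ≠ "" := hfs z (by simp)
      have hr : ∀ w ∈ r, w ≠ "" := fun w hw => hfs w (by simp [hw])
      have h3 : pvStepA (pvStepA (pvStepA (tris, []) x) y) z
          = (tris ++ [[x, y, z]], [x, y, z]) := by
        simp [pvStepA, hx, hy, hz]
      rw [List.foldl_cons, List.foldl_cons, List.foldl_cons, h3,
        pvStepA_steady r hr _ x y z, pvWin3_cons]
      simp

-- per line, A's inner loop equals B's collect-then-window pass
theorem pvLine_eq (tris : List (List String)) (ws : List String) :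
    (ws.foldl pvStepA (tris, [])).1 = tris ++ pvWin3 (ws.filter (fun w => w ≠ "")) := by
  rw [pvStepA_skip]
  exact pvStepA_run _ (fun w hw => (List.mem_filter.mp hw).2 |> of_decide_eq_true) tris

-- ===== VERDICT (by name: the statement is the Claim_ definition above) =====
theorem create_trigrams_spec : Claim_equal_create_trigrams := by
  intro data hdom
  clear hdom
  show create_trigrams data = create_trigrams_alt data
  unfold create_trigrams create_trigrams_alt
  induction data using List.reverseRecOn with
  | nil => rfl
  | append_singleton xs line ih =>
      rw [List.foldl_append, List.foldl_append, ← ih]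
      simp only [List.foldl_cons, List.foldl_nil]
      exact pvLine_eq _ _
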